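-- pv_equiv track=rewrite | github.com/Jiarui0923/caltable-bio | caltable_bio/protein/sequence.py | _render_sequence
-- ===== SOURCE A (Python) =====
-- def _render_sequence(sequence, fragment_length=10, column_num=6):
--     fragments = [sequence[i:i+fragment_length] for i in range(0, len(sequence), fragment_length)]
--     index_content, fragment_content = [], []
--     for index, fragment in enumerate(fragments):
--         _index = str(index)
--         _index = f'<b>{_index}</b>' + ''.join(['&nbsp;']*(fragment_length - len(_index)))
--         index_content.append(_index)
--         fragment_content.append(f'<span style="background-color:grey;"><b>{fragment[0]}</b></span>{fragment[1:]}')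
--     index_content = [index_content[i:i+column_num] for i in range(0, len(index_content), column_num)]
--     fragment_content = [fragment_content[i:i+column_num] for i in range(0, len(fragment_content), column_num)]
--     _content = '<br><br>'.join(['&nbsp;'.join(ind) + '<br>' + '&nbsp;'.join(frag) for (ind, frag) in zip(index_content, fragment_content)])
--     _content = f'<div style="overflow:scroll; font-family: Courier,monospace;">{_content}</div>'
--     return _content
-- ===== SOURCE B (Python) =====
-- def _render_sequence(sequence, fragment_length=10, column_num=6):
--     wrap = '<div style="overflow:scroll; font-family: Courier,monospace;">{}</div>'
--     if fragment_length <= 0 or column_num <= 0: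
--         return wrap.format('')
--     num_frags = (len(sequence) + fragment_length - 1) // fragment_length
--     rows = []
--     for r in range(0, num_frags, column_num):
--         idx_cells, frag_cells = [], []
--         for k in range(r, min(r + column_num, num_frags)):
--             s = str(k)
--             idx_cells.append('<b>' + s + '</b>' + '&nbsp;' * (fragment_length - len(s)))
--             frag = sequence[k * fragment_length:(k + 1) * fragment_length]
--             frag_cells.append(f'<span style="background-color:grey;"><b>{frag[0]}</b></span>{frag[1:]}')
--         rows.append('&nbsp;'.join(idx_cells) + '<br>' + '&nbsp;'.join(frag_cells))
--     return wrap.format('<br><br>'.join(rows))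
-- ===== Notes on version B (the rewrite author's own statement) =====
-- stated objective: alternative
-- what changed: B drops A's flat index/fragment cell lists and the two re-chunking slice comprehensions, instead rendering each row directly with one nested loop over rows and the global fragment indices inside the row.
-- crash fix: On fragment_length = 0 or column_num = 0 A raises ValueError from range() with a zero step; B returns the bare wrapper div with empty content. — e.g. on _render_sequence("AB", 0, 3): A raises ValueError, B returns "<div style=\"overflow:scroll; font-family: Courier,monospace;\"></div>"
import Mathlib
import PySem

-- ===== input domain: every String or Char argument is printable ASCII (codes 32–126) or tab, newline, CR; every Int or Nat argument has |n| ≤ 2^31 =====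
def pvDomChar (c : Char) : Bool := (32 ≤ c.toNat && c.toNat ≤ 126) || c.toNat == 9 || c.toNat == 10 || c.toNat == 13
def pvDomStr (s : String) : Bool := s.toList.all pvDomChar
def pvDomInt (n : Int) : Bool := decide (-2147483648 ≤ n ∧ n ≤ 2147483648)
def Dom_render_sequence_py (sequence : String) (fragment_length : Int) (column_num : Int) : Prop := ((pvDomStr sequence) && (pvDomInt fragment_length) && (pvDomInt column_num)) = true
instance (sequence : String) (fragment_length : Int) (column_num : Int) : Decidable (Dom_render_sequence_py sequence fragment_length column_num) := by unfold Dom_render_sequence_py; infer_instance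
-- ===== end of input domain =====

-- B merges A's flat cell pass and the two re-chunking comprehensions into one row-shaped nested
-- loop that renders each row directly (objective: alternative decomposition, same asymptotic cost).

-- shared HTML literal constants (pure data, used by both ports)
def pvWrapL : List Char := "<div style=\"overflow:scroll; font-family: Courier,monospace;\">".toList
def pvWrapR : List Char := "</div>".toList
def pvNbsp : List Char := "&nbsp;".toList
def pvBr : List Char := "<br>".toList
def pvBr2 : List Char := "<br><br>".toList
def pvSpanL : List Char := "<span style=\"background-color:grey;\"><b>".toList
def pvSpanR : List Char := "</b></span>".toList

-- ===== PORT A =====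
-- _index = f'<b>{_index}</b>' + ''.join(['&nbsp;']*(fragment_length - len(_index)))
def aIndexCell (fragment_length : Int) (index : Int) : List Char :=
  let s := PySem.Int.toChars index
  ("<b>".toList ++ s ++ "</b>".toList) ++
    PySem.Chars.join [] (PySem.List.pyRepeat [pvNbsp] (fragment_length - (s.length : Int)))

-- f'<span style="background-color:grey;"><b>{fragment[0]}</b></span>{fragment[1:]}'
-- (fragment is never empty when this is reached; pyGetD with an arbitrary default transliterates fragment[0])
def aFragCell (fragment : List Char) : List Char :=
  pvSpanL ++ [PySem.List.pyGetD fragment 0 ' '] ++ pvSpanR ++ PySem.List.slice fragment (some 1) none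

def render_sequence_py (sequence : String) (fragment_length : Int) (column_num : Int) : String :=
  let seq := sequence.toList
  let fragments := (PySem.List.pyRange 0 (seq.length : Int) fragment_length).map
      (fun i => PySem.List.slice seq (some i) (some (i + fragment_length)))
  let ifc := (PySem.List.enumerate fragments).foldl
      (fun acc p => (acc.1 ++ [aIndexCell fragment_length p.1], acc.2 ++ [aFragCell p.2]))
      (([], []) : List (List Char) × List (List Char))
  let index_chunks := (PySem.List.pyRange 0 (ifc.1.length : Int) column_num).map
      (fun i => PySem.List.slice ifc.1 (some i) (some (i + column_num)))
  let fragment_chunks := (PySem.List.pyRange 0 (ifc.2.length : Int) column_num).map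
      (fun i => PySem.List.slice ifc.2 (some i) (some (i + column_num)))
  let content := PySem.Chars.join pvBr2
      ((index_chunks.zip fragment_chunks).map
        (fun p => PySem.Chars.join pvNbsp p.1 ++ pvBr ++ PySem.Chars.join pvNbsp p.2))
  String.ofList (pvWrapL ++ content ++ pvWrapR)

-- ===== PORT B =====
-- '<b>' + s + '</b>' + '&nbsp;' * (fragment_length - len(s))
def bIndexCell (fragment_length : Int) (k : Int) : List Char :=
  let s := PySem.Int.toChars k
  "<b>".toList ++ s ++ "</b>".toList ++
    PySem.List.pyRepeat pvNbsp (fragment_length - (s.length : Int))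

def render_sequence_py_alt (sequence : String) (fragment_length : Int) (column_num : Int) : String :=
  if fragment_length ≤ 0 ∨ column_num ≤ 0 then
    String.ofList (pvWrapL ++ pvWrapR)
  else
    let seq := sequence.toList
    let num_frags := PySem.Int.floordiv ((seq.length : Int) + fragment_length - 1) fragment_length
    let rows := (PySem.List.pyRange 0 num_frags column_num).foldl
      (fun rows r =>
        let cells := (PySem.List.pyRange r (min (r + column_num) num_frags) 1).foldl
          (fun acc k =>
            let frag := PySem.List.slice seq (some (k * fragment_length))
                (some ((k + 1) * fragment_length))
            (acc.1 ++ [bIndexCell fragment_length k],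
             acc.2 ++ [pvSpanL ++ [PySem.List.pyGetD frag 0 ' '] ++ pvSpanR ++
                       PySem.List.slice frag (some 1) none]))
          (([], []) : List (List Char) × List (List Char))
        rows ++ [PySem.Chars.join pvNbsp cells.1 ++ pvBr ++ PySem.Chars.join pvNbsp cells.2])
      ([] : List (List Char))
    String.ofList (pvWrapL ++ PySem.Chars.join pvBr2 rows ++ pvWrapR)

-- ===== PRECONDITION & SPEC =====
-- Pre_ excludes exactly fragment_length = 0 and column_num = 0, where the Python A raises
-- ValueError (zero range step); A returns normally on every other input.
def Pre_render_sequence_py (sequence : String) (fragment_length : Int) (column_num : Int) : Prop :=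
  fragment_length ≠ 0 ∧ column_num ≠ 0
instance (sequence : String) (fragment_length : Int) (column_num : Int) : Decidable (Pre_render_sequence_py sequence fragment_length column_num) := by unfold Pre_render_sequence_py; infer_instance

def pvWitness_render_sequence_py : String × Int × Int := ("MKVLATGHES", 4, 2)

-- On fragment_length = 0 or column_num = 0 A raises ValueError (zero range step); B returns the bare wrapper div.
def Raises_render_sequence_py (sequence : String) (fragment_length : Int) (column_num : Int) : Prop :=
  fragment_length = 0 ∨ column_num = 0
instance (sequence : String) (fragment_length : Int) (column_num : Int) : Decidable (Raises_render_sequence_py sequence fragment_length column_num) := by unfold Raises_render_sequence_py; infer_instance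
def pvRaiseWitness_render_sequence_py : String × Int × Int := ("AB", 0, 3)
def pvRaiseWitnessOut_render_sequence_py : String := "<div style=\"overflow:scroll; font-family: Courier,monospace;\"></div>"

def Spec_render_sequence_py (sequence : String) (fragment_length : Int) (column_num : Int) (out : String) : Prop := out = render_sequence_py_alt sequence fragment_length column_num
instance (sequence : String) (fragment_length : Int) (column_num : Int) (out : String) : Decidable (Spec_render_sequence_py sequence fragment_length column_num out) := by unfold Spec_render_sequence_py; infer_instance

-- ===== CLAIM (what is proved, stated in full; the proofs are below) =====
def Claim_equal_render_sequence_py : Prop := ∀ (sequence : String) (fragment_length : Int) (column_num : Int), Dom_render_sequence_py sequence fragment_length column_num → Pre_render_sequence_py sequence fragment_length column_num → Spec_render_sequence_py sequence fragment_length column_num (render_sequence_py sequence fragment_length column_num)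

def Claim_raises_render_sequence_py : Prop := (∀ (sequence : String) (fragment_length : Int) (column_num : Int), Dom_render_sequence_py sequence fragment_length column_num → Raises_render_sequence_py sequence fragment_length column_num → ¬ Pre_render_sequence_py sequence fragment_length column_num) ∧ (Dom_render_sequence_py (pvRaiseWitness_render_sequence_py.1) (pvRaiseWitness_render_sequence_py.2.1) (pvRaiseWitness_render_sequence_py.2.2) ∧ Raises_render_sequence_py (pvRaiseWitness_render_sequence_py.1) (pvRaiseWitness_render_sequence_py.2.1) (pvRaiseWitness_render_sequence_py.2.2) ∧ render_sequence_py_alt (pvRaiseWitness_render_sequence_py.1) (pvRaiseWitness_render_sequence_py.2.1) (pvRaiseWitness_render_sequence_py.2.2) = pvRaiseWitnessOut_render_sequence_py)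

-- ===== LEMMAS AND PROOFS =====

-- proof-side canonical form: the row r of the table, cells indexed globally
def pvRow (seq : List Char) (fl cn M : Int) (r : Int) : List Char :=
  let ks := PySem.List.pyRange r (min (r + cn) M) 1
  PySem.Chars.join pvNbsp (ks.map (fun k => aIndexCell fl k)) ++ pvBr ++
  PySem.Chars.join pvNbsp (ks.map (fun k =>
    aFragCell (PySem.List.slice seq (some (k * fl)) (some (k * fl + fl)))))

def pvCanon (seq : List Char) (fl cn M : Int) : String :=
  String.ofList (pvWrapL ++
    PySem.Chars.join pvBr2 ((PySem.List.pyRange 0 M cn).map (pvRow seq fl cn M)) ++ pvWrapR)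

-- number of fragments
def pvMF (seq : List Char) (fl : Int) : Nat :=
  if (0 : Int) < (seq.length : Int) then (((seq.length : Int) + fl - 1) / fl).toNat else 0

-- ''.join(['&nbsp;']*k) joins with the empty separator, i.e. flattens
lemma join_nil_sep (xs : List (List Char)) : PySem.Chars.join [] xs = xs.flatten := by
  show [].intercalate xs = xs.flatten
  induction xs with
  | nil => rfl
  | cons h t ih =>
    cases t with
    | nil => simp [List.intercalate]
    | cons a b =>
      rw [show ([] : List Char).intercalate (h :: a :: b)
            = h ++ [] ++ ([] : List Char).intercalate (a :: b)
          from PySem.Chars.join_cons_cons [] h a b]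
      simp [ih]

-- the two cell builders agree
lemma cell_eq (fl k : Int) : bIndexCell fl k = aIndexCell fl k := by
  simp [aIndexCell, bIndexCell, join_nil_sep,
    PySem.List.pyRepeat, List.append_assoc]

-- a pyRange with a negative step and start ≤ stop is empty
lemma pyRange_neg_nil (a b s : Int) (hs : s < 0) (hab : a ≤ b) :
    PySem.List.pyRange a b s = [] := by
  simp only [PySem.List.pyRange]
  rw [if_neg (by omega), if_neg (by omega), if_neg (by omega)]
  simp

lemma pyRange_self (a s : Int) : PySem.List.pyRange a a s = [] := by
  simp [PySem.List.pyRange]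

lemma enum_map_range {β : Type} (g : Nat → β) (M : Nat) :
    PySem.List.enumerate ((List.range M).map g) =
      (List.range M).map (fun (k : Nat) => ((k : Int), g k)) := by
  induction M with
  | zero => simp [PySem.List.enumerate_nil]
  | succ m ih =>
      rw [List.range_succ]
      simp only [List.map_append, List.map_cons, List.map_nil]
      rw [PySem.List.enumerate_append, ih]
      simp [PySem.List.enumerate_cons, PySem.List.enumerate_nil]

-- slicing [g 0, …, g (M-1)] at [r : r+c] is the cells at indices r ≤ k < min (r+c) M
lemma slice_map_range {β : Type} (g : Nat → β) (M : Nat) (r c : Int) (hr : 0 ≤ r) (hc : 0 ≤ c) :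
    PySem.List.slice ((List.range M).map g) (some r) (some (r + c)) =
      (PySem.List.pyRange r (min (r + c) (M : Int)) 1).map (fun k => g k.toNat) := by
  rw [PySem.List.slice_toNat _ hr (by omega), PySem.List.pyRange_one]
  apply List.ext_getElem
  · simp; omega
  · intro i h1 h2
    simp only [List.getElem_take, List.getElem_drop, List.getElem_map, List.getElem_range]
    congr 1
    simp at h1 h2
    omega

-- B's ceiling fragment count is A's range length
lemma num_frags_eq (seq : List Char) (fl : Int) (hfl : 0 < fl) :
    PySem.Int.floordiv ((seq.length : Int) + fl - 1) fl = ((pvMF seq fl : Nat) : Int) := by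
  rw [PySem.Int.floordiv_eq_ediv_of_pos hfl]
  unfold pvMF
  by_cases h : (0 : Int) < (seq.length : Int)
  · rw [if_pos h, Int.toNat_of_nonneg (Int.ediv_nonneg (by omega) (by omega))]
  · rw [if_neg h]
    have hz : (seq.length : Int) = 0 := by omega
    rw [hz]
    simp only [zero_add, Nat.cast_zero]
    exact Int.ediv_eq_zero_of_lt (by omega) (by omega)

lemma A_eq_canon (sequence : String) (fl cn : Int) (hfl : 0 < fl) (hcn : 0 < cn) :
    render_sequence_py sequence fl cn =
      pvCanon sequence.toList fl cn ((pvMF sequence.toList fl : Nat) : Int) := by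
  simp only [render_sequence_py]
  rw [PySem.List.pyRange_of_pos _ _ hfl, List.map_map]
  set seq := sequence.toList with hseq
  have hif : (if (0:Int) < (seq.length : Int) then (((seq.length : Int) - 0 + fl - 1) / fl).toNat else 0) = pvMF seq fl := by
    simp [pvMF]
  rw [hif]
  have hcomp : ((fun i => PySem.List.slice seq (some i) (some (i + fl))) ∘ fun (k : Nat) => 0 + fl * (k : Int))
      = fun (k : Nat) => PySem.List.slice seq (some (fl * (k : Int))) (some (fl * (k : Int) + fl)) := by
    funext k; simp
  rw [hcomp, enum_map_range]
  have hfold : ∀ (l : List (Int × List Char)),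
      List.foldl (fun acc p => (acc.1 ++ [aIndexCell fl p.1], acc.2 ++ [aFragCell p.2]))
        (([], []) : List (List Char) × List (List Char)) l
      = (l.map (fun p => aIndexCell fl p.1), l.map (fun p => aFragCell p.2)) := by
    intro l
    rw [PySem.List.foldl_prod_mk (f := fun (x : List (List Char)) (p : Int × List Char) => x ++ [aIndexCell fl p.1])
        (g := fun (x : List (List Char)) (p : Int × List Char) => x ++ [aFragCell p.2]),
      PySem.List.foldl_append_singleton_eq_map, PySem.List.foldl_append_singleton_eq_map]
    simp
  rw [hfold]
  simp only [List.map_map, Function.comp_def, List.length_map, List.length_range]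
  rw [List.zip_map', List.map_map]
  unfold pvCanon pvRow
  apply congrArg
  apply congrArg (fun l => pvWrapL ++ l ++ pvWrapR)
  apply congrArg
  apply List.map_congr_left
  intro r hr
  rw [PySem.List.mem_pyRange_iff_of_pos hcn] at hr
  obtain ⟨hr0, hrM, -⟩ := hr
  simp only [Function.comp_def]
  rw [slice_map_range _ _ _ _ hr0 hcn.le, slice_map_range _ _ _ _ hr0 hcn.le]
  congr 1
  · congr 1
    apply congrArg
    apply List.map_congr_left
    intro k hk
    rw [PySem.List.mem_pyRange_one] at hk
    rw [Int.toNat_of_nonneg (by omega)]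
  · apply congrArg
    apply List.map_congr_left
    intro k hk
    rw [PySem.List.mem_pyRange_one] at hk
    rw [Int.toNat_of_nonneg (by omega), mul_comm fl k]

lemma B_eq_canon (sequence : String) (fl cn : Int) (hfl : 0 < fl) (hcn : 0 < cn) :
    render_sequence_py_alt sequence fl cn =
      pvCanon sequence.toList fl cn ((pvMF sequence.toList fl : Nat) : Int) := by
  simp only [render_sequence_py_alt]
  rw [if_neg (by omega)]
  set seq := sequence.toList with hseq
  rw [num_frags_eq seq fl hfl]
  rw [PySem.List.foldl_append_singleton_eq_map]
  unfold pvCanon pvRow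
  apply congrArg
  apply congrArg (fun l => pvWrapL ++ l ++ pvWrapR)
  apply congrArg
  rw [List.nil_append]
  apply List.map_congr_left
  intro r hr
  rw [PySem.List.mem_pyRange_iff_of_pos hcn] at hr
  obtain ⟨hr0, hrM, -⟩ := hr
  rw [PySem.List.foldl_prod_mk
      (f := fun (x : List (List Char)) (k : Int) => x ++ [bIndexCell fl k])
      (g := fun (x : List (List Char)) (k : Int) => x ++
        [pvSpanL ++ [PySem.List.pyGetD (PySem.List.slice seq (some (k * fl)) (some ((k + 1) * fl))) 0 ' '] ++ pvSpanR ++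
         PySem.List.slice (PySem.List.slice seq (some (k * fl)) (some ((k + 1) * fl))) (some 1) none]),
    PySem.List.foldl_append_singleton_eq_map, PySem.List.foldl_append_singleton_eq_map]
  simp only [List.nil_append]
  congr 1
  · congr 1
    apply congrArg
    apply List.map_congr_left
    intro k hk
    exact cell_eq fl k
  · apply congrArg
    apply List.map_congr_left
    intro k hk
    simp only [aFragCell, add_mul, one_mul]

lemma deg_case (sequence : String) (fl cn : Int) (h : fl < 0 ∨ cn < 0)
    (hfl : fl ≠ 0) (hcn : cn ≠ 0) :
    render_sequence_py sequence fl cn = render_sequence_py_alt sequence fl cn := by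
  simp only [render_sequence_py, render_sequence_py_alt]
  rw [if_pos (by omega)]
  rcases h with h1 | h2
  · rw [pyRange_neg_nil 0 _ fl h1 (by positivity)]
    simp [PySem.List.enumerate_nil, pyRange_self, PySem.Chars.join_nil]
  · rw [pyRange_neg_nil 0 _ cn h2 (by positivity), pyRange_neg_nil 0 _ cn h2 (by positivity)]
    simp [PySem.Chars.join_nil]

-- ===== VERDICT (by name: the statement is the Claim_ definition above) =====
theorem render_sequence_py_spec : Claim_equal_render_sequence_py := by
  intro sequence fl cn _ hpre
  unfold Spec_render_sequence_py
  obtain ⟨hfl, hcn⟩ := hpre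
  by_cases h1 : 0 < fl
  · by_cases h2 : 0 < cn
    · rw [A_eq_canon sequence fl cn h1 h2, B_eq_canon sequence fl cn h1 h2]
    · exact deg_case sequence fl cn (Or.inr (by omega)) hfl hcn
  · exact deg_case sequence fl cn (Or.inl (by omega)) hfl hcn

@[simp]
theorem render_sequence_py_raises : Claim_raises_render_sequence_py := by
  unfold Claim_raises_render_sequence_py
  exact ⟨by intro s fl cn _ hr hp; unfold Raises_render_sequence_py at hr;
            unfold Pre_render_sequence_py at hp; tauto, by decide⟩
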